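-- pv_equiv track=rewrite | github.com/Prasanna-2005/PROJECTS | SIMPLE BUILDS/TEXT_FORMATTER/justify-text.py | justify_lines
-- ===== SOURCE A (Python) =====
-- def justify_lines(inp, width):
--     output = []
--     line = []
--     current_length = 0
--
--     for word in inp:
--         if current_length + len(word) + len(line) > width:
--             space_to_be_filled = width - current_length
--             for i in range(space_to_be_filled):
--                 if len(line) > 1:
--                     line[i % (len(line) - 1)] += ' '
--                 else:
--                     line[0] += ' '
--             output.append(''.join(line))
--             line = []
--             current_length = 0
--
--         line.append(word)
--         current_length += len(word)
--
--     output.append(' '.join(line).ljust(width))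
--     return output
-- ===== SOURCE B (Python) =====
-- def _fmt_full(words, width):
--     # full-justify one non-final line
--     if len(words) <= 1:
--         return ''.join(words) + ' ' * max(0, width - sum(len(w) for w in words))
--     gaps = len(words) - 1
--     q, r = divmod(max(0, width - sum(len(w) for w in words)), gaps)
--     return ''.join(w + ' ' * (q + (1 if j < r else 0))
--                    for j, w in enumerate(words[:-1])) + words[-1]
--
--
-- def justify_lines(inp, width):
--     # pass 1: greedy line breaking into lists of words (cur_sum tracks the last line's letters)
--     lines = [[]]
--     cur_sum = 0
--     for word in inp:
--         if cur_sum + len(word) + len(lines[-1]) > width: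
--             lines.append([word])
--             cur_sum = len(word)
--         else:
--             lines[-1].append(word)
--             cur_sum += len(word)
--     # pass 2: format every full line closed-form; last line is left-justified
--     last = ' '.join(lines[-1])
--     return [_fmt_full(ws, width) for ws in lines[:-1]] \
--         + [last + ' ' * max(0, width - len(last))]
-- ===== Notes on version B (the rewrite author's own statement) =====
-- stated objective: alternative
-- what changed: B splits the work into a pure greedy line-breaking pass (list of word-lists) and a separate formatting pass that computes each gap's padding in closed form with divmod, instead of A's single loop that mutates the current line character-by-character with a round-robin space-insertion inner loop.
import Mathlib
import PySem

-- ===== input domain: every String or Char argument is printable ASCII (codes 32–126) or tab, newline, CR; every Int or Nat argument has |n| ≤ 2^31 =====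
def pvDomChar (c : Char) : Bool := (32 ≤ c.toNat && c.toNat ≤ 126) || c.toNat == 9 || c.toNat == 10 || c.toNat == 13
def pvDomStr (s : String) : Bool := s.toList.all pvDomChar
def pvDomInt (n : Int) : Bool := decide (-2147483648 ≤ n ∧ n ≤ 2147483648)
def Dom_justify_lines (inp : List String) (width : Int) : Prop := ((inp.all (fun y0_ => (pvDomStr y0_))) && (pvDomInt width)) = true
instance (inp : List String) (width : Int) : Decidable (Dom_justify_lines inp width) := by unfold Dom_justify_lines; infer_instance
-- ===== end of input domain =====

-- ===== PORT A =====
-- B re-justifies the same lines in two passes (pure line breaking, then closed-form divmod padding)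
-- instead of A's single loop with a round-robin character-appending inner loop; objective: alternative.
-- str.ljust(width) (character-list level; exact: no pad when width <= len)
def pyLjust (cs : List Char) (w : Int) : List Char :=
  cs ++ List.replicate (w - (cs.length : Int)).toNat ' '

-- body of A's inner `for i in range(space_to_be_filled)`: line[i % (len(line)-1)] += ' ' / line[0] += ' '
-- (on an empty line Python raises IndexError; List.set/getD make it a no-op here — excluded by Pre_)
def padStep (line : List (List Char)) (i : Int) : List (List Char) :=
  if 1 < line.length then
    let k := (PySem.Int.mod i ((line.length : Int) - 1)).toNat
    line.set k (line.getD k [] ++ [' '])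
  else
    line.set 0 (line.getD 0 [] ++ [' '])

-- one iteration of A's `for word in inp` over state (output, line, current_length)
def stepA (width : Int) (st : List (List Char) × List (List Char) × Int) (word : String) :
    List (List Char) × List (List Char) × Int :=
  let (output, line, clen) := st
  let w := word.toList
  let (output, line, clen) :=
    if clen + (w.length : Int) + (line.length : Int) > width then
      let line' := (PySem.List.pyRange 0 (width - clen) 1).foldl padStep line
      (output ++ [PySem.Chars.join [] line'], ([] : List (List Char)), (0 : Int))
    else (output, line, clen)
  (output, line ++ [w], clen + (w.length : Int))

def justify_lines (inp : List String) (width : Int) : List String :=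
  let fin := inp.foldl (stepA width) ([], [], 0)
  (fin.1 ++ [pyLjust (PySem.Chars.join [' '] fin.2.1) width]).map String.mk

-- ===== PORT B =====
def sumLen (ws : List (List Char)) : Int := (ws.map fun w => (w.length : Int)).sum

-- _fmt_full from Source B: pad a non-final line to width, gap padding computed by divmod
def fmtFull (words : List (List Char)) (width : Int) : List Char :=
  if words.length ≤ 1 then
    PySem.Chars.join [] words ++ List.replicate (max 0 (width - sumLen words)).toNat ' '
  else
    -- gaps = len-1, space = max 0 (width - sum of lengths), (q, r) = divmod(space, gaps)
    (PySem.Chars.join [] (words.dropLast.zipIdx.map fun p =>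
        p.1 ++ List.replicate
          (PySem.Int.floordiv (max 0 (width - sumLen words)) ((words.length : Int) - 1)
            + if (p.2 : Int) < PySem.Int.mod (max 0 (width - sumLen words)) ((words.length : Int) - 1)
              then 1 else 0).toNat ' '))
      ++ words.getLastD []

-- one iteration of Source B's line-breaking pass over the pair (list of word-lists, letters in the last line)
def stepB (width : Int) (st : List (List (List Char)) × Int) (word : String) :
    List (List (List Char)) × Int :=
  let cur := st.1.getLastD []
  let w := word.toList
  if st.2 + (w.length : Int) + (cur.length : Int) > width then
    (st.1 ++ [[w]], (w.length : Int))
  else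
    (st.1.dropLast ++ [cur ++ [w]], st.2 + (w.length : Int))

def justify_lines_alt (inp : List String) (width : Int) : List String :=
  let lines := (inp.foldl (stepB width) ([[]], 0)).1
  let last := PySem.Chars.join [' '] (lines.getLastD [])
  (lines.dropLast.map (fun ws => fmtFull ws width)
      ++ [last ++ List.replicate (max 0 (width - (last.length : Int))).toNat ' ']).map String.mk

-- ===== PRECONDITION & SPEC =====
-- Pre_ excludes exactly the inputs where A raises IndexError: a first word longer than a
-- positive width makes A index line[0] on an empty line.
def Pre_justify_lines (inp : List String) (width : Int) : Prop :=
  inp = [] ∨ width ≤ 0 ∨ (((inp.headD "").toList.length : Int) ≤ width)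
instance (inp : List String) (width : Int) : Decidable (Pre_justify_lines inp width) := by
  unfold Pre_justify_lines; infer_instance
def pvWitness_justify_lines : List String × Int := (["ab", "c"], 5)

def Spec_justify_lines (inp : List String) (width : Int) (out : List String) : Prop := out = justify_lines_alt inp width
instance (inp : List String) (width : Int) (out : List String) : Decidable (Spec_justify_lines inp width out) := by unfold Spec_justify_lines; infer_instance

-- ===== CLAIM (what is proved, stated in full; the proofs are below) =====
def Claim_equal_justify_lines : Prop := ∀ (inp : List String) (width : Int), Dom_justify_lines inp width → Pre_justify_lines inp width → Spec_justify_lines inp width (justify_lines inp width)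

-- ===== LEMMAS AND PROOFS =====

lemma toNat_max_zero (x : Int) : (max 0 x).toNat = x.toNat := by omega

lemma pyLjust_max (cs : List Char) (w : Int) :
    cs ++ List.replicate (max 0 (w - (cs.length : Int))).toNat ' ' = pyLjust cs w := by
  unfold pyLjust; rw [toNat_max_zero]

lemma join_nil_eq_flatten (xs : List (List Char)) : PySem.Chars.join [] xs = xs.flatten := by
  simp only [PySem.Chars.join, List.intercalate]
  induction xs with
  | nil => simp
  | cons a t ih => cases t <;> simp_all [List.intersperse]

lemma pyRange_nil (s : Int) (hs : s ≤ 0) : PySem.List.pyRange 0 s 1 = [] := by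
  rw [List.eq_nil_iff_forall_not_mem]
  intro x hx
  rw [PySem.List.mem_pyRange_one] at hx
  omega

-- closed-form round-robin count: number of i < n with i % g = j
def padN (g j n : Nat) : Nat := n / g + (if j < n % g then 1 else 0)

lemma padN_zero (g j : Nat) : padN g j 0 = 0 := by simp [padN]

lemma padN_succ (g j n : Nat) (hg : 0 < g) (hj : j < g) :
    padN g j (n + 1) = padN g j n + (if n % g = j then 1 else 0) := by
  obtain ⟨q, r, hr, rfl⟩ : ∃ q r, r < g ∧ n = g * q + r :=
    ⟨n / g, n % g, Nat.mod_lt _ hg, (Nat.div_add_mod n g).symm⟩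
  have hdiv : (g * q + r) / g = q := by
    rw [Nat.mul_add_div hg, Nat.div_eq_of_lt hr]; omega
  have hmod : (g * q + r) % g = r := by
    rw [Nat.mul_add_mod, Nat.mod_eq_of_lt hr]
  rcases Nat.lt_or_ge (r + 1) g with h | h
  · have hd1 : (g * q + r + 1) / g = q := by
      rw [Nat.add_assoc, Nat.mul_add_div hg, Nat.div_eq_of_lt h]; omega
    have hm1 : (g * q + r + 1) % g = r + 1 := by
      rw [Nat.add_assoc, Nat.mul_add_mod, Nat.mod_eq_of_lt h]
    simp only [padN, hdiv, hmod, hd1, hm1]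
    split_ifs <;> omega
  · have hrg : r + 1 = g := by omega
    have hd1 : (g * q + r + 1) / g = q + 1 := by
      rw [Nat.add_assoc, hrg, ← Nat.mul_succ, Nat.mul_div_cancel_left _ hg]
    have hm1 : (g * q + r + 1) % g = 0 := by
      rw [Nat.add_assoc, hrg, ← Nat.mul_succ, Nat.mul_mod_right]
    simp only [padN, hdiv, hmod, hd1, hm1]
    split_ifs <;> omega

-- A's pad loop on a single-word line just appends spaces to that word
lemma padLoop_single (x : List Char) (n : Nat) :
    (List.range n).foldl (fun l (m : Nat) => padStep l (m : Int)) [x]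
      = [x ++ List.replicate n ' '] := by
  induction n with
  | zero => simp
  | succ n ih =>
      rw [List.range_succ, List.foldl_append, ih]
      simp [padStep, List.replicate_succ']

-- A's pad loop on a multi-word line: word j receives padN (len-1) j n spaces, the last word none
lemma padLoop_multi (line : List (List Char)) (hlen : 2 ≤ line.length) (n : Nat) :
    (List.range n).foldl (fun l (m : Nat) => padStep l (m : Int)) line
      = line.zipIdx.map (fun p =>
          p.1 ++ List.replicate
            (if p.2 < line.length - 1 then padN (line.length - 1) p.2 n else 0) ' ') := by
  induction n with
  | zero =>
      simp only [List.range_zero, List.foldl_nil, padN_zero]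
      apply List.ext_getElem
      · simp
      · intro j h1 h2; simp
  | succ n ih =>
      rw [List.range_succ, List.foldl_append, ih, List.foldl_cons, List.foldl_nil]
      set M := line.zipIdx.map (fun p =>
          p.1 ++ List.replicate
            (if p.2 < line.length - 1 then padN (line.length - 1) p.2 n else 0) ' ') with hMdef
      have hM : M.length = line.length := by simp [hMdef]
      have hg1 : 0 < line.length - 1 := by omega
      have hkg : n % (line.length - 1) < line.length - 1 := Nat.mod_lt _ hg1
      unfold padStep
      rw [if_pos (by omega : 1 < M.length)]
      have hc : (M.length : Int) - 1 = ((line.length - 1 : Nat) : Int) := by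
        rw [hM]; omega
      rw [hc, PySem.Int.mod_natCast, Int.toNat_natCast]
      show M.set (n % (line.length - 1))
          (M.getD (n % (line.length - 1)) [] ++ [' ']) = _
      have hgd : M.getD (n % (line.length - 1)) []
          = line.getD (n % (line.length - 1)) []
            ++ List.replicate (padN (line.length - 1) (n % (line.length - 1)) n) ' ' := by
        rw [List.getD_eq_getElem M [] (by omega), List.getD_eq_getElem line [] (by omega)]
        simp [hMdef, List.getElem_zipIdx, hkg]
      rw [hgd]
      apply List.ext_getElem
      · simp [hMdef]
      · intro j hj1 hj2
        have hjl : j < line.length := by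
          have := hj1; rw [List.length_set, hM] at this; exact this
        rw [List.getElem_set]
        simp only [hMdef, List.getElem_map, List.getElem_zipIdx, Nat.zero_add]
        by_cases hkj : n % (line.length - 1) = j
        · rw [if_pos hkj]
          subst hkj
          rw [if_pos hkg, padN_succ _ _ _ hg1 hkg, if_pos rfl,
              List.getD_eq_getElem line [] (by omega), List.replicate_succ']
          simp [List.append_assoc]
        · rw [if_neg hkj]
          by_cases hjg : j < line.length - 1
          · rw [if_pos hjg, if_pos hjg, padN_succ _ _ _ hg1 hjg, if_neg hkj]
            simp
          · rw [if_neg hjg, if_neg hjg]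

-- the flush A performs equals B's closed-form formatter (on a nonempty line)
-- the two cast helpers fmtFull's Int divmod needs
lemma fmt_count_eq (g n j : Nat) :
    (PySem.Int.floordiv (n : Int) (g : Int)
      + if (j : Int) < PySem.Int.mod (n : Int) (g : Int) then 1 else 0).toNat
      = padN g j n := by
  rw [PySem.Int.floordiv_natCast, PySem.Int.mod_natCast]
  unfold padN
  split_ifs with h1 h2 h2
  · generalize n / g = a; omega
  · exact absurd (by exact_mod_cast h1) h2
  · exact absurd (by exact_mod_cast h2) h1
  · generalize n / g = a; omega

-- on a nonempty multi-word line, a per-index padding map splits as dropLast ++ last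
lemma flatten_pad_split (line : List (List Char)) (hne : line ≠ []) (f : Nat → Nat)
    (hlast : f (line.length - 1) = 0) :
    (line.zipIdx.map (fun p => p.1 ++ List.replicate (f p.2) ' ')).flatten
      = (line.dropLast.zipIdx.map (fun p => p.1 ++ List.replicate (f p.2) ' ')).flatten
        ++ line.getLastD [] := by
  conv_lhs => rw [← List.dropLast_append_getLast hne]
  rw [List.zipIdx_append, List.map_append, List.flatten_append]
  congr 1
  simp [List.length_dropLast, List.getLastD_eq_getLast?, hlast]
  simp [List.getLast?_eq_getLast, hne]

lemma flush_eq (line : List (List Char)) (hne : line ≠ []) (width : Int) :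
    PySem.Chars.join [] ((PySem.List.pyRange 0 (width - sumLen line) 1).foldl padStep line)
      = fmtFull line width := by
  rcases (by omega : width - sumLen line ≤ 0 ∨ 0 < width - sumLen line) with hs | hs
  · rw [pyRange_nil _ hs, List.foldl_nil]
    unfold fmtFull
    by_cases h1 : line.length ≤ 1
    · obtain ⟨x, rfl⟩ : ∃ x, line = [x] := by
        cases line with
        | nil => exact absurd rfl hne
        | cons a t => cases t with
          | nil => exact ⟨a, rfl⟩
          | cons b t => simp at h1
      rw [if_pos (by simp)]
      simp [show (max 0 (width - sumLen [x])).toNat = 0 by omega]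
    · rw [if_neg h1]
      have hgc : ((line.length : Int) - 1) = ((line.length - 1 : Nat) : Int) := by omega
      have hsp : max 0 (width - sumLen line) = (((0 : Nat) : Nat) : Int) := by omega
      rw [join_nil_eq_flatten, join_nil_eq_flatten, hgc, hsp]
      have h0 : ∀ p ∈ line.dropLast.zipIdx,
          p.1 ++ List.replicate
            ((PySem.Int.floordiv (((0 : Nat) : Int)) (((line.length - 1 : Nat) : Nat) : Int)
              + if (p.2 : Int) < PySem.Int.mod (((0 : Nat) : Int)) (((line.length - 1 : Nat) : Nat) : Int)
                then 1 else 0).toNat) ' ' = p.1 := by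
        intro p _
        rw [fmt_count_eq, padN_zero]
        simp
      rw [List.map_congr_left h0,
          show line.dropLast.zipIdx.map (fun p => p.1) = line.dropLast by
            simpa using List.zipIdx_map_fst 0 line.dropLast]
      conv_lhs => rw [← List.dropLast_append_getLast hne]
      rw [List.flatten_append]
      simp [List.getLastD_eq_getLast?]
      simp [List.getLast?_eq_getLast, hne]
  · have hsn : width - sumLen line = ((width - sumLen line).toNat : Int) := by omega
    set n := (width - sumLen line).toNat with hn
    rw [hsn, PySem.List.pyRange_zero_natCast, List.foldl_map]
    by_cases h1 : line.length ≤ 1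
    · obtain ⟨x, rfl⟩ : ∃ x, line = [x] := by
        cases line with
        | nil => exact absurd rfl hne
        | cons a t => cases t with
          | nil => exact ⟨a, rfl⟩
          | cons b t => simp at h1
      rw [padLoop_single]
      unfold fmtFull
      rw [if_pos (by simp)]
      have hmx : (max 0 (width - sumLen [x])).toNat = n := by omega
      simp [hmx]
    · rw [padLoop_multi line (by omega) n]
      unfold fmtFull
      rw [if_neg h1]
      have hgc : ((line.length : Int) - 1) = ((line.length - 1 : Nat) : Int) := by omega
      have hsp : max 0 (width - sumLen line) = ((n : Nat) : Int) := by omega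
      rw [join_nil_eq_flatten, join_nil_eq_flatten, hgc, hsp]
      have hsplit := flatten_pad_split line hne
        (fun j => if j < line.length - 1 then padN (line.length - 1) j n else 0) (by simp)
      rw [show (line.zipIdx.map (fun p =>
            p.1 ++ List.replicate
              (if p.2 < line.length - 1 then padN (line.length - 1) p.2 n else 0) ' ')).flatten
          = _ from hsplit]
      congr 1
      refine congrArg List.flatten ?_
      apply List.map_congr_left
      intro p hp
      have hp2 : p.2 < line.dropLast.length := by
        have := List.mem_zipIdx hp; omega
      rw [List.length_dropLast] at hp2
      rw [fmt_count_eq]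
      beta_reduce
      rw [if_pos hp2]

-- pointwise simulation of A's loop by B's loop
lemma sim (width : Int) (ws : List String) :
    ∀ (lines0 : List (List (List Char))) (cur : List (List Char)), cur ≠ [] →
    (let fin := ws.foldl (stepA width) (lines0.map (fun l => fmtFull l width), cur, sumLen cur)
     fin.1 ++ [pyLjust (PySem.Chars.join [' '] fin.2.1) width])
    = (let lines := (ws.foldl (stepB width) (lines0 ++ [cur], sumLen cur)).1
       lines.dropLast.map (fun l => fmtFull l width)
         ++ [pyLjust (PySem.Chars.join [' '] (lines.getLastD [])) width]) := by
  induction ws with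
  | nil =>
      intro lines0 cur hne
      simp
  | cons w ws ih =>
      intro lines0 cur hne
      simp only [List.foldl_cons]
      by_cases c : sumLen cur + (w.toList.length : Int) + (cur.length : Int) > width
      · have hA : stepA width (lines0.map (fun l => fmtFull l width), cur, sumLen cur) w
            = ((lines0 ++ [cur]).map (fun l => fmtFull l width), [w.toList], sumLen [w.toList]) := by
          simp only [stepA]
          rw [if_pos c, flush_eq cur hne width]
          simp [sumLen]
        have hB : stepB width (lines0 ++ [cur], sumLen cur) w
            = ((lines0 ++ [cur]) ++ [[w.toList]], sumLen [w.toList]) := by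
          simp only [stepB, List.getLastD_concat]
          rw [if_pos c]
          simp [sumLen]
        rw [hA, hB]
        exact ih (lines0 ++ [cur]) [w.toList] (by simp)
      · have hA : stepA width (lines0.map (fun l => fmtFull l width), cur, sumLen cur) w
            = (lines0.map (fun l => fmtFull l width), cur ++ [w.toList], sumLen (cur ++ [w.toList])) := by
          simp only [stepA]
          rw [if_neg c]
          simp [sumLen]
        have hB : stepB width (lines0 ++ [cur], sumLen cur) w
            = (lines0 ++ [cur ++ [w.toList]], sumLen (cur ++ [w.toList])) := by
          simp only [stepB, List.getLastD_concat]
          rw [if_neg c, List.dropLast_concat]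
          simp [sumLen]
        rw [hA, hB]
        exact ih lines0 (cur ++ [w.toList]) (by simp)

-- ===== VERDICT (by name: the statement is the Claim_ definition above) =====
theorem justify_lines_spec : Claim_equal_justify_lines := by
  intro inp width hDom hPre
  unfold Spec_justify_lines justify_lines justify_lines_alt
  cases inp with
  | nil =>
      simp [pyLjust, toNat_max_zero]
  | cons w ws =>
      simp only [List.foldl_cons]
      rw [pyLjust_max]
      by_cases c : (0 : Int) + (w.toList.length : Int) + (0 : Int) > width
      · have hw : width ≤ 0 := by
          rcases hPre with h | h | h
          · simp at h
          · exact h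
          · simp only [List.headD_cons] at h; omega
        have hA : stepA width ([], [], 0) w
            = (([[]] : List (List (List Char))).map (fun l => fmtFull l width),
               [w.toList], sumLen [w.toList]) := by
          simp only [stepA]
          rw [if_pos (by simpa using c)]
          rw [show width - 0 = width by ring, pyRange_nil width hw]
          simp [fmtFull, sumLen, PySem.Chars.join, List.intercalate,
                show (max 0 width).toNat = 0 by omega]
        have hB : stepB width ([[]], 0) w = ([[]] ++ [[w.toList]], sumLen [w.toList]) := by
          simp only [stepB]
          rw [if_pos (by simpa [sumLen] using c)]
          simp [sumLen]
        rw [hA, hB]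
        have := sim width ws [[]] [w.toList] (by simp)
        simp only [] at this
        rw [this]
      · have hA : stepA width ([], [], 0) w
            = (([] : List (List (List Char))).map (fun l => fmtFull l width),
               [w.toList], sumLen [w.toList]) := by
          simp only [stepA]
          rw [if_neg (by simpa using c)]
          simp [sumLen]
        have hB : stepB width ([[]], 0) w = ([] ++ [[w.toList]], sumLen [w.toList]) := by
          simp only [stepB]
          rw [if_neg (by simpa [sumLen] using c)]
          simp [sumLen]
        rw [hA, hB]
        have := sim width ws [] [w.toList] (by simp)
        simp only [] at this
        rw [this]
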